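-- pv_equiv track=rewrite | github.com/qtn-grd/Exam_Ranks_42 | EXAM_RANK_03/sculptor.py | sculptor
-- ===== SOURCE A (Python) =====
-- def sculptor(to_sculpt: str) -> str:
--
--     low = to_sculpt.lower()
--
--     count = False
--     result = ""
--
--     for char in low:
--         if not char.isalpha():
--             result += char
--         else:
--             if not count:
--                 result += char
--                 count = True
--             else:
--                 char = char.upper()
--                 result += char
--                 count = False
--
--     return result
-- ===== SOURCE B (Python) =====
-- def sculptor(to_sculpt: str) -> str:
--     low = to_sculpt.lower()
--     letters = [i for i, c in enumerate(low) if c.isalpha()]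
--     ups = set(letters[1::2])
--     return "".join(c.upper() if i in ups else c for i, c in enumerate(low))
-- ===== Notes on version B (the rewrite author's own statement) =====
-- stated objective: alternative
-- what changed: Replaces the single-pass boolean-toggle accumulation with an index-table decomposition: first pass collects the positions of alphabetic characters, the odd-ordinal ones (letters[1::2]) become a set, and a second pass uppercases exactly the characters at those positions.
import Mathlib
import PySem

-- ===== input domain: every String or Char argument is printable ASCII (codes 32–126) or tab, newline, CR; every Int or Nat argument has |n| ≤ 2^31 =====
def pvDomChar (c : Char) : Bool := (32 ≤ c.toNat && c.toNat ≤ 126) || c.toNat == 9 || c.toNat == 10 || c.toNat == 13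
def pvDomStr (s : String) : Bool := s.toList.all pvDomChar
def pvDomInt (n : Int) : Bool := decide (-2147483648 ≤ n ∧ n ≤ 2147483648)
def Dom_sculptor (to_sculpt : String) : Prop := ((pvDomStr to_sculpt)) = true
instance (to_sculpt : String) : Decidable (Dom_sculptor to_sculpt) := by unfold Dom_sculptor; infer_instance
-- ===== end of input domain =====

-- B replaces A's single-pass boolean-toggle with an index-table decomposition (collect letter
-- positions, uppercase the odd-ordinal ones via a position set in a second pass); same O(n) cost.


-- ===== PORT A =====
-- literal port of A: lower the string, then one pass with a boolean toggle `count`,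
-- appending to `result` (modelled as a List Char; `result += char` is `++ [c]`,
-- `char.isalpha()` / `char.upper()` on a 1-char string are Chars.isalpha / upperChar).
def sculptor (to_sculpt : String) : String :=
  let low := (PySem.Str.lower to_sculpt).toList
  let r := low.foldl (fun (st : Bool × List Char) c =>
    if ¬ PySem.Chars.isalpha c then (st.1, st.2 ++ [c])
    else if ¬ st.1 then (true, st.2 ++ [c])
    else (false, st.2 ++ [PySem.Chars.upperChar c])) (false, [])
  String.ofList r.2

-- ===== PORT B =====
-- literal port of Source B: letter-position table, set of the odd-ordinal positions (letters[1::2]),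
-- then one map over enumerate(low); ''.join over the 1-char pieces is String.ofList.
def sculptor_alt (to_sculpt : String) : String :=
  let chars := (PySem.Str.lower to_sculpt).toList
  let letters := ((PySem.List.enumerate chars).filter
      (fun p => PySem.Chars.isalpha p.2)).map (fun p => p.1)
  let ups : PySem.Set Int := PySem.Set.ofList ((PySem.List.slice? letters (some 1) none 2).getD [])
  String.ofList ((PySem.List.enumerate chars).map
    (fun p => if PySem.Set.contains ups p.1 then PySem.Chars.upperChar p.2 else p.2))

-- ===== PRECONDITION & SPEC =====
def Spec_sculptor (to_sculpt : String) (out : String) : Prop := out = sculptor_alt to_sculpt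
instance (to_sculpt : String) (out : String) : Decidable (Spec_sculptor to_sculpt out) := by unfold Spec_sculptor; infer_instance

-- ===== CLAIM (what is proved, stated in full; the proofs are below) =====
def Claim_equal_sculptor : Prop := ∀ (to_sculpt : String), Dom_sculptor to_sculpt → Spec_sculptor to_sculpt (sculptor to_sculpt)

-- ===== LEMMAS AND PROOFS =====

-- the common recursive description: alternate-uppercase letters, `b` = "next letter goes upper"
def specRec : List Char → Bool → List Char
  | [], _ => []
  | c :: cs, b =>
    if PySem.Chars.isalpha c then
      (if b then PySem.Chars.upperChar c else c) :: specRec cs (!b)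
    else c :: specRec cs b

-- every second element starting at index 0 / index 1
def evens {α : Type} : List α → List α
  | [] => []
  | [x] => [x]
  | x :: _ :: xs => x :: evens xs

def odds {α : Type} (l : List α) : List α := evens (l.drop 1)

theorem odds_cons {α : Type} (x : α) (xs : List α) : odds (x :: xs) = evens xs := rfl

theorem evens_cons {α : Type} (x : α) (xs : List α) : evens (x :: xs) = x :: odds xs := by
  cases xs <;> rfl

theorem mem_evens {α : Type} {a : α} : ∀ {l : List α}, a ∈ evens l → a ∈ l := by
  intro l
  induction l using evens.induct with
  | case1 => intro h; rw [show evens ([] : List α) = [] from rfl] at h; cases h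
  | case2 x => exact fun h => h
  | case3 x y xs ih =>
    rw [show evens (x :: y :: xs) = x :: evens xs from rfl]
    intro h
    rcases List.mem_cons.mp h with h | h
    · simp [h]
    · simp [ih h]

theorem mem_odds {α : Type} {a : α} {l : List α} (h : a ∈ odds l) : a ∈ l :=
  List.mem_of_mem_drop (mem_evens h)

-- xs sampled at even indices 0,2,4,… is `evens xs`
theorem filterMap_even_idx {α : Type} : ∀ (xs : List α),
    (List.range ((xs.length + 1) / 2)).filterMap (fun k => xs[2 * k]?) = evens xs := by
  intro xs
  induction xs using evens.induct with
  | case1 => rw [show evens ([] : List α) = [] from rfl]; simp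
  | case2 x => rw [show evens [x] = [x] from rfl]; simp
  | case3 x y ys ih =>
    have hlen : ((x :: y :: ys).length + 1) / 2 = (ys.length + 1) / 2 + 1 := by
      simp only [List.length_cons]; omega
    rw [hlen, List.range_succ_eq_map, List.filterMap_cons, List.filterMap_map]
    simp only [List.getElem?_cons_zero, Nat.mul_zero]
    rw [show evens (x :: y :: ys) = x :: evens ys from rfl]
    have hfun : ((fun k => (x :: y :: ys)[2 * k]?) ∘ Nat.succ) = (fun k => ys[2 * k]?) := by
      funext k
      simp only [Function.comp_apply, Nat.succ_eq_add_one]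
      rw [show 2 * (k + 1) = (2 * k + 1) + 1 from by omega,
        List.getElem?_cons_succ, List.getElem?_cons_succ]
    rw [hfun, ih]

-- letters[1::2] is `odds letters`
theorem slice_step2 {α : Type} (l : List α) :
    PySem.List.slice? l (some 1) none 2 = some (odds l) := by
  cases l with
  | nil => rfl
  | cons x xs =>
    rw [PySem.List.slice?, PySem.List.sliceIndices]
    simp only [if_neg (by norm_num : ¬ (2 : Int) = 0)]
    cases xs with
    | nil => rfl
    | cons y ys =>
      have hlen : ((x :: y :: ys).length : Int) = (ys.length : Int) + 2 := by
        simp; omega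
      simp only [hlen]
      norm_num
      have hmin : min (1 : Int) ((ys.length : Int) + 2) = 1 := by omega
      have hlt : (1 : Int) < (ys.length : Int) + 2 := by omega
      rw [hmin, if_pos hlt]
      have hcount : (((ys.length : Int) + 2 - 1 + 2 - 1) / 2).toNat = (ys.length + 2) / 2 := by
        have : ((ys.length : Int) + 2 - 1 + 2 - 1) = ((ys.length + 2 : Nat) : Int) := by push_cast; ring
        rw [this, show ((2:Int) = ((2:Nat):Int)) from rfl, ← Int.natCast_div, Int.toNat_natCast]
      rw [hcount]
      rw [odds_cons]
      have hh : (y :: ys).length + 1 = ys.length + 2 := by simp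
      rw [← filterMap_even_idx (y :: ys), hh]
      congr 1
      funext k
      have : ((1 : Int) + 2 * (k : Int)).toNat = 2 * k + 1 := by omega
      rw [this, List.getElem?_cons_succ]

-- the letter-position table, in recursive form
def lettersF (cs : List Char) (n : Int) : List Int :=
  ((PySem.List.enumerate cs n).filter (fun p => PySem.Chars.isalpha p.2)).map (fun p => p.1)

theorem lettersF_cons (c : Char) (cs : List Char) (n : Int) :
    lettersF (c :: cs) n =
      if PySem.Chars.isalpha c then n :: lettersF cs (n + 1) else lettersF cs (n + 1) := by
  simp only [lettersF, PySem.List.enumerate_cons, List.filter_cons]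
  split <;> simp_all

theorem enumerate_fst_le {α : Type} : ∀ (cs : List α) (n : Int) (p : Int × α),
    p ∈ PySem.List.enumerate cs n → n ≤ p.1 := by
  intro cs
  induction cs with
  | nil => simp [PySem.List.enumerate_nil]
  | cons c cs ih =>
    intro n p hp
    rw [PySem.List.enumerate_cons] at hp
    rcases List.mem_cons.mp hp with h | h
    · simp [h]
    · have := ih (n + 1) p h; omega

theorem lettersF_lb {cs : List Char} {n i : Int} (h : i ∈ lettersF cs n) : n ≤ i := by
  simp only [lettersF, List.mem_map, List.mem_filter] at h
  obtain ⟨p, ⟨hp, _⟩, rfl⟩ := h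
  exact enumerate_fst_le cs n p hp

-- core: uppercasing at the odd- (resp. even-) ordinal letter positions is exactly the
-- alternating pass started with b = false (resp. b = true)
theorem core : ∀ (cs : List Char) (n : Int),
    ((PySem.List.enumerate cs n).map
      (fun p => if p.1 ∈ odds (lettersF cs n) then PySem.Chars.upperChar p.2 else p.2)
        = specRec cs false)
  ∧ ((PySem.List.enumerate cs n).map
      (fun p => if p.1 ∈ evens (lettersF cs n) then PySem.Chars.upperChar p.2 else p.2)
        = specRec cs true) := by
  intro cs
  induction cs with
  | nil => intro n; simp [PySem.List.enumerate_nil, specRec]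
  | cons c cs ih =>
    intro n
    have tail_bound : ∀ p ∈ PySem.List.enumerate cs (n + 1), n + 1 ≤ p.1 :=
      fun p hp => enumerate_fst_le cs (n + 1) p hp
    rw [lettersF_cons]
    by_cases hc : PySem.Chars.isalpha c
    · rw [if_pos hc]
      constructor
      · rw [PySem.List.enumerate_cons, List.map_cons, odds_cons]
        have hn : n ∉ evens (lettersF cs (n + 1)) := fun h => by
          have := lettersF_lb (mem_evens h); omega
        rw [if_neg hn, specRec, if_pos hc, Bool.not_false]
        congr 1
        exact (ih (n + 1)).2
      · rw [PySem.List.enumerate_cons, List.map_cons, evens_cons]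
        rw [if_pos (List.mem_cons_self ..), specRec, if_pos hc, Bool.not_true]
        congr 1
        rw [← (ih (n + 1)).1]
        apply List.map_congr_left
        intro p hp
        have hne : p.1 ≠ n := by have := tail_bound p hp; omega
        simp only [List.mem_cons, hne, false_or]
    · rw [if_neg hc]
      have head : ∀ sel : List Int → List Int,
          (∀ a l, a ∈ sel l → a ∈ l) →
          (if n ∈ sel (lettersF cs (n + 1)) then PySem.Chars.upperChar c else c) = c := by
        intro sel hsel
        rw [if_neg]
        intro h
        have := lettersF_lb (hsel _ _ h); omega
      constructor
      · rw [PySem.List.enumerate_cons, List.map_cons,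
          head odds (fun a l h => mem_odds h), specRec, if_neg hc]
        congr 1
        exact (ih (n + 1)).1
      · rw [PySem.List.enumerate_cons, List.map_cons,
          head evens (fun a l h => mem_evens h), specRec, if_neg hc]
        congr 1
        exact (ih (n + 1)).2

-- A's loop, characterised
theorem foldA : ∀ (cs : List Char) (b : Bool) (acc : List Char),
    (cs.foldl (fun (st : Bool × List Char) c =>
      if ¬ PySem.Chars.isalpha c then (st.1, st.2 ++ [c])
      else if ¬ st.1 then (true, st.2 ++ [c])
      else (false, st.2 ++ [PySem.Chars.upperChar c])) (b, acc)).2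
    = acc ++ specRec cs b := by
  intro cs
  induction cs with
  | nil => intro b acc; simp [specRec]
  | cons c cs ih =>
    intro b acc
    rw [List.foldl_cons]
    by_cases hc : PySem.Chars.isalpha c
    · cases b
      · rw [show (if ¬PySem.Chars.isalpha c = true then (((false : Bool), acc).1, ((false : Bool), acc).2 ++ [c])
            else if ¬((false : Bool), acc).1 = true then (true, ((false : Bool), acc).2 ++ [c])
            else (false, ((false : Bool), acc).2 ++ [PySem.Chars.upperChar c]))
            = ((true : Bool), acc ++ [c]) from by simp [hc]]
        rw [ih, specRec, if_pos hc]
        simp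
      · rw [show (if ¬PySem.Chars.isalpha c = true then (((true : Bool), acc).1, ((true : Bool), acc).2 ++ [c])
            else if ¬((true : Bool), acc).1 = true then (true, ((true : Bool), acc).2 ++ [c])
            else (false, ((true : Bool), acc).2 ++ [PySem.Chars.upperChar c]))
            = ((false : Bool), acc ++ [PySem.Chars.upperChar c]) from by simp [hc]]
        rw [ih, specRec, if_pos hc]
        simp
    · rw [show (if ¬PySem.Chars.isalpha c = true then ((b, acc).1, (b, acc).2 ++ [c])
          else if ¬(b, acc).1 = true then (true, (b, acc).2 ++ [c])
          else (false, (b, acc).2 ++ [PySem.Chars.upperChar c]))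
          = (b, acc ++ [c]) from by simp [hc]]
      rw [ih, specRec, if_neg hc]
      simp

-- ===== VERDICT (by name: the statement is the Claim_ definition above) =====
theorem sculptor_spec : Claim_equal_sculptor := by
  intro s _
  unfold Spec_sculptor sculptor sculptor_alt
  simp only []
  rw [foldA ((PySem.Str.lower s).toList) false []]
  rw [List.nil_append]
  congr 1
  rw [show ((PySem.List.enumerate (PySem.Str.lower s).toList).filter
        (fun p => PySem.Chars.isalpha p.2)).map (fun p => p.1)
      = lettersF (PySem.Str.lower s).toList 0 from rfl]
  rw [slice_step2, Option.getD_some]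
  rw [← (core (PySem.Str.lower s).toList 0).1]
  apply List.map_congr_left
  intro p _
  by_cases h : p.1 ∈ odds (lettersF (PySem.Str.lower s).toList 0)
  · rw [if_pos ((PySem.Set.contains_iff _ _).mpr ((PySem.Set.mem_ofList _ _).mpr h)), if_pos h]
  · rw [if_neg (fun hb => h ((PySem.Set.mem_ofList _ _).mp ((PySem.Set.contains_iff _ _).mp hb))),
      if_neg h]
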